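-- pv_equiv track=rewrite | github.com/sidimohamed31/Ong-Connect | OngWeb/routes/public.py | get_pagination_iter
-- ===== SOURCE A (Python) =====
-- def get_pagination_iter(current_page, total_pages, left_edge=1, right_edge=1, left_current=1, right_current=1):
--     """Generate pagination iterator with ellipses."""
--     if total_pages <= 1:
--         return []
--
--     if total_pages <= 7:
--         return list(range(1, total_pages + 1))
--
--     pages = []
--     last = 0
--
--     for num in range(1, total_pages + 1):
--         if (num <= left_edge) or \
--            (num > total_pages - right_edge) or \
--            (abs(num - current_page) <= left_current):
--
--             if last + 1 != num:
--                 pages.append(None)  # Ellipsis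
--             pages.append(num)
--             last = num
--
--     return pages
-- ===== SOURCE B (Python) =====
-- def _merge(spans):
--     """Merge sorted intervals that overlap or touch."""
--     if len(spans) < 2:
--         return spans
--     (a, b), (c, d) = spans[0], spans[1]
--     if c <= b + 1:
--         return _merge([(a, max(b, d))] + spans[2:])
--     return [spans[0]] + _merge(spans[1:])
--
--
-- def get_pagination_iter(current_page, total_pages, left_edge=1, right_edge=1, left_current=1, right_current=1):
--     """Generate pagination iterator with ellipses."""
--     if total_pages <= 1:
--         return []
--     if total_pages <= 7:
--         return list(range(1, total_pages + 1))
--     spans = [(1, min(left_edge, total_pages)),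
--              (max(1, current_page - left_current), min(total_pages, current_page + left_current)),
--              (max(1, total_pages - right_edge + 1), total_pages)]
--     spans = sorted((s for s in spans if s[0] <= s[1]), key=lambda s: s[0])
--     pages = []
--     last = 0
--     for lo, hi in _merge(spans):
--         if lo != last + 1:
--             pages.append(None)
--         pages.extend(range(lo, hi + 1))
--         last = hi
--     return pages
-- ===== Notes on version B (the rewrite author's own statement) =====
-- stated objective: faster
-- what changed: Instead of scanning every page 1..total_pages and testing the membership predicate per page, B computes the three selected spans (left edge, current window, right edge) in closed form, sorts and merges them as intervals, and emits each merged span wholesale with a None gap marker between spans.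
import Mathlib
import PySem

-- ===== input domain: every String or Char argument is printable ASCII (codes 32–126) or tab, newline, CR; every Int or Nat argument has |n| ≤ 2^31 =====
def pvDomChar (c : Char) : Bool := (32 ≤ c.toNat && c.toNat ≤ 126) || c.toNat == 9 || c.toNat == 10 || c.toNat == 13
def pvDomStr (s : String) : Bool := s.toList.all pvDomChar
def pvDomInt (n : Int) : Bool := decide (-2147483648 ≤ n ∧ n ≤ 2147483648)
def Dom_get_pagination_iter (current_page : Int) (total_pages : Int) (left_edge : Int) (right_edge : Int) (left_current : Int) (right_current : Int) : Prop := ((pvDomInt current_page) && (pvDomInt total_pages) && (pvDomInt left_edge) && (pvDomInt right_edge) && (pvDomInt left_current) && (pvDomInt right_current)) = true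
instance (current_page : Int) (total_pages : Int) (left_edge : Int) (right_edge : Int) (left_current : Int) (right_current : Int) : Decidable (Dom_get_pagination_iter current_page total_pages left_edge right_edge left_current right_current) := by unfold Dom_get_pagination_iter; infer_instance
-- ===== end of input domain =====

-- B computes the three selected index spans, merges them as intervals, and emits whole spans at
-- once, instead of A's per-page scan of 1..total_pages with a membership test; same return value.

-- ===== PORT A =====
def get_pagination_iter (current_page : Int) (total_pages : Int) (left_edge : Int) (right_edge : Int) (left_current : Int) (right_current : Int) : List (Option Int) :=
  if total_pages ≤ 1 then []
  else if total_pages ≤ 7 then (PySem.List.pyRange 1 (total_pages + 1) 1).map Option.some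
  else
    ((PySem.List.pyRange 1 (total_pages + 1) 1).foldl
      (fun (s : List (Option Int) × Int) num =>
        if num ≤ left_edge ∨ total_pages - right_edge < num ∨ |num - current_page| ≤ left_current then
          ((if s.2 + 1 ≠ num then s.1 ++ [none] else s.1) ++ [some num], num)
        else s)
      ([], 0)).1

-- ===== PORT B =====
-- port of Source B's _merge: merge sorted intervals that overlap or touch
def pvMergeSpans : List (Int × Int) → List (Int × Int)
  | [] => []
  | [s] => [s]
  | a :: b :: rest =>
    if b.1 ≤ a.2 + 1 then pvMergeSpans ((a.1, max a.2 b.2) :: rest)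
    else a :: pvMergeSpans (b :: rest)
termination_by l => l.length
decreasing_by all_goals simp

def get_pagination_iter_alt (current_page : Int) (total_pages : Int) (left_edge : Int) (right_edge : Int) (left_current : Int) (right_current : Int) : List (Option Int) :=
  if total_pages ≤ 1 then []
  else if total_pages ≤ 7 then (PySem.List.pyRange 1 (total_pages + 1) 1).map Option.some
  else
    ((pvMergeSpans
        (PySem.List.sorted
          (([(1, min left_edge total_pages),
             (max 1 (current_page - left_current), min total_pages (current_page + left_current)),
             (max 1 (total_pages - right_edge + 1), total_pages)] : List (Int × Int)).filter
            (fun s => s.1 ≤ s.2))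
          (fun s => s.1) false)).foldl
      (fun (st : List (Option Int) × Int) m =>
        ((if m.1 ≠ st.2 + 1 then st.1 ++ [none] else st.1) ++ (PySem.List.pyRange m.1 (m.2 + 1) 1).map Option.some, m.2))
      ([], 0)).1

-- ===== PRECONDITION & SPEC =====
def Spec_get_pagination_iter (current_page : Int) (total_pages : Int) (left_edge : Int) (right_edge : Int) (left_current : Int) (right_current : Int) (out : List (Option Int)) : Prop := out = get_pagination_iter_alt current_page total_pages left_edge right_edge left_current right_current
instance (current_page : Int) (total_pages : Int) (left_edge : Int) (right_edge : Int) (left_current : Int) (right_current : Int) (out : List (Option Int)) : Decidable (Spec_get_pagination_iter current_page total_pages left_edge right_edge left_current right_current out) := by unfold Spec_get_pagination_iter; infer_instance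

-- ===== CLAIM (what is proved, stated in full; the proofs are below) =====
def Claim_equal_get_pagination_iter : Prop := ∀ (current_page : Int) (total_pages : Int) (left_edge : Int) (right_edge : Int) (left_current : Int) (right_current : Int), Dom_get_pagination_iter current_page total_pages left_edge right_edge left_current right_current → Spec_get_pagination_iter current_page total_pages left_edge right_edge left_current right_current (get_pagination_iter current_page total_pages left_edge right_edge left_current right_current)

-- ===== LEMMAS AND PROOFS =====

-- the pages covered by a list of intervals
def pvFlat (l : List (Int × Int)) : List Int := l.flatMap (fun m => PySem.List.pyRange m.1 (m.2 + 1) 1)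

-- the gap-then-page step of A's loop body (its selected branch)
def pvStep (s : List (Option Int) × Int) (num : Int) : List (Option Int) × Int :=
  ((if s.2 + 1 ≠ num then s.1 ++ [none] else s.1) ++ [some num], num)

theorem pv_flat_cons (m : Int × Int) (l : List (Int × Int)) :
    pvFlat (m :: l) = PySem.List.pyRange m.1 (m.2 + 1) 1 ++ pvFlat l := by
  simp [pvFlat]

theorem pv_mem_flat (x : Int) (l : List (Int × Int)) :
    x ∈ pvFlat l ↔ ∃ m ∈ l, m.1 ≤ x ∧ x ≤ m.2 := by
  simp only [pvFlat, List.mem_flatMap, PySem.List.mem_pyRange_one]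
  constructor
  · rintro ⟨m, hm, h1, h2⟩; exact ⟨m, hm, h1, by omega⟩
  · rintro ⟨m, hm, h1, h2⟩; exact ⟨m, hm, h1, by omega⟩

-- pvMergeSpans of proper, lo-sorted intervals: proper, gap-separated, and covering the same pages
theorem pv_merge_props (spans : List (Int × Int))
    (h1 : ∀ s ∈ spans, s.1 ≤ s.2) (h2 : spans.Pairwise (fun a b => a.1 ≤ b.1)) :
    (∀ m ∈ pvMergeSpans spans, m.1 ≤ m.2) ∧
    (pvMergeSpans spans).Pairwise (fun a b => a.2 + 1 < b.1) ∧
    (∀ x, x ∈ pvFlat (pvMergeSpans spans) ↔ x ∈ pvFlat spans) := by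
  fun_induction pvMergeSpans spans with
  | case1 => exact ⟨by simp, by simp, fun x => Iff.rfl⟩
  | case2 s =>
    exact ⟨by simpa using h1 s (by simp), by simp, fun x => Iff.rfl⟩
  | case3 a b rest hcond ih =>
    have hab : a.1 ≤ b.1 := (List.pairwise_cons.mp h2).1 b (by simp)
    have ha : a.1 ≤ a.2 := h1 a (by simp)
    have hb : b.1 ≤ b.2 := h1 b (by simp)
    have h1' : ∀ s ∈ (a.1, max a.2 b.2) :: rest, s.1 ≤ s.2 := by
      intro s hs
      rcases List.mem_cons.mp hs with h | h
      · rw [h]; exact le_max_of_le_left ha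
      · exact h1 s (by simp [h])
    have h2' : ((a.1, max a.2 b.2) :: rest).Pairwise (fun a b => a.1 ≤ b.1) := by
      rcases List.pairwise_cons.mp h2 with ⟨hA, h2b⟩
      rcases List.pairwise_cons.mp h2b with ⟨_, hrest⟩
      exact List.pairwise_cons.mpr ⟨fun s hs => hA s (List.mem_cons_of_mem b hs), hrest⟩
    obtain ⟨p1, p2, p3⟩ := ih h1' h2'
    refine ⟨p1, p2, fun x => ?_⟩
    rw [p3 x, pv_mem_flat, pv_mem_flat]
    constructor
    · rintro ⟨m, hm, hx1, hx2⟩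
      rcases List.mem_cons.mp hm with h | h
      · rw [h] at hx1 hx2
        simp only at hx1 hx2
        rcases le_total a.2 b.2 with hmx | hmx
        · rw [max_eq_right hmx] at hx2
          by_cases hxa : x ≤ a.2
          · exact ⟨a, by simp, hx1, hxa⟩
          · exact ⟨b, by simp, by omega, hx2⟩
        · rw [max_eq_left hmx] at hx2
          exact ⟨a, by simp, hx1, hx2⟩
      · exact ⟨m, by simp [h], hx1, hx2⟩
    · rintro ⟨m, hm, hx1, hx2⟩
      rcases List.mem_cons.mp hm with h | h
      · rw [h] at hx1 hx2
        exact ⟨(a.1, max a.2 b.2), by simp, hx1, le_max_of_le_left hx2⟩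
      · rcases List.mem_cons.mp h with h' | h'
        · rw [h'] at hx1 hx2
          exact ⟨(a.1, max a.2 b.2), by simp, le_trans hab hx1, le_max_of_le_right hx2⟩
        · exact ⟨m, by simp [h'], hx1, hx2⟩
  | case4 a b rest hcond ih =>
    have h1' : ∀ s ∈ b :: rest, s.1 ≤ s.2 := fun s hs => h1 s (by simp [List.mem_cons.mp hs])
    have h2' : (b :: rest).Pairwise (fun a b => a.1 ≤ b.1) := (List.pairwise_cons.mp h2).2
    obtain ⟨p1, p2, p3⟩ := ih h1' h2'
    have hafter : ∀ m ∈ pvMergeSpans (b :: rest), a.2 + 1 < m.1 := by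
      intro m hm
      have hm12 : m.1 ≤ m.2 := p1 m hm
      have : m.1 ∈ pvFlat (pvMergeSpans (b :: rest)) :=
        (pv_mem_flat m.1 _).mpr ⟨m, hm, le_refl _, hm12⟩
      obtain ⟨s, hs, hs1, _⟩ := (pv_mem_flat m.1 _).mp ((p3 m.1).mp this)
      have hbs : b.1 ≤ s.1 := by
        rcases List.mem_cons.mp hs with h | h
        · simp [h]
        · exact (List.pairwise_cons.mp h2').1 s h
      omega
    refine ⟨?_, ?_, fun x => ?_⟩
    · intro m hm
      rcases List.mem_cons.mp hm with h | h
      · rw [h]; exact h1 a (by simp)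
      · exact p1 m h
    · exact List.pairwise_cons.mpr ⟨hafter, p2⟩
    · rw [pv_flat_cons, pv_flat_cons, List.mem_append, List.mem_append, p3 x]

-- rendering one proper interval page by page: one optional gap marker, then the whole span
theorem pv_render (n : Nat) : ∀ (lo hi : Int), (hi - lo).toNat = n → lo ≤ hi →
    ∀ (pages : List (Option Int)) (last : Int),
    (PySem.List.pyRange lo (hi + 1) 1).foldl pvStep (pages, last)
      = ((if lo ≠ last + 1 then pages ++ [none] else pages) ++ (PySem.List.pyRange lo (hi + 1) 1).map Option.some, hi) := by
  induction n with
  | zero =>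
    intro lo hi hn hle pages last
    have : lo = hi := by omega
    subst this
    rw [PySem.List.pyRange_one_singleton]
    simp only [List.foldl_cons, List.foldl_nil, pvStep, List.map_cons, List.map_nil]
    simp [ne_comm]
  | succ k ih =>
    intro lo hi hn hle pages last
    rw [PySem.List.pyRange_one_cons (by omega)]
    simp only [List.foldl_cons]
    have step1 : pvStep (pages, last) lo
        = ((if lo ≠ last + 1 then pages ++ [none] else pages) ++ [some lo], lo) := by
      unfold pvStep
      simp [ne_comm]
    rw [step1, ih (lo + 1) hi (by omega) (by omega)]
    simp [PySem.List.pyRange_one_cons (show lo < hi + 1 by omega)]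

-- B's interval-at-a-time loop equals the page-at-a-time loop over the covered pages
theorem pv_fold_merged (merged : List (Int × Int)) :
    (∀ m ∈ merged, m.1 ≤ m.2) → ∀ (st : List (Option Int) × Int),
    merged.foldl
      (fun (st : List (Option Int) × Int) m =>
        ((if m.1 ≠ st.2 + 1 then st.1 ++ [none] else st.1) ++ (PySem.List.pyRange m.1 (m.2 + 1) 1).map Option.some, m.2))
      st
    = (pvFlat merged).foldl pvStep st := by
  induction merged with
  | nil => intro _ st; rfl
  | cons m rest ih =>
    intro h st
    rw [pv_flat_cons, List.foldl_append, List.foldl_cons,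
      pv_render (m.2 - m.1).toNat m.1 m.2 rfl (h m (by simp)) st.1 st.2,
      ih (fun s hs => h s (by simp [hs]))]

-- a gap-separated list of proper intervals covers a strictly increasing page list
theorem pv_flat_pairwise_lt (l : List (Int × Int))
    (h1 : ∀ m ∈ l, m.1 ≤ m.2) (h2 : l.Pairwise (fun a b => a.2 + 1 < b.1)) :
    (pvFlat l).Pairwise (· < ·) := by
  rw [pvFlat, List.pairwise_flatMap]
  refine ⟨fun m _ => PySem.List.pairwise_lt_pyRange_one _ _, ?_⟩
  refine h2.imp_of_mem ?_
  intro a b _ _ hab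
  intro x hx y hy
  rw [PySem.List.mem_pyRange_one] at hx hy
  omega
-- A's guarded fold over the full range equals the plain fold over the filtered range.
theorem pv_foldl_guard {α : Type} (l : List Int) (p : Int → Prop) [DecidablePred p] (f : α × Int → Int → α × Int) (init : α × Int) :
    l.foldl (fun s num => if p num then f s num else s) init
    = (l.filter (fun x => decide (p x))).foldl f init := by
  induction l generalizing init with
  | nil => rfl
  | cons a t ih =>
    by_cases h : p a <;> simp [h, ih]

-- the merged spans cover exactly the pages A's predicate selects, in ascending order
theorem pv_flat_eq_filter (current_page total_pages left_edge right_edge left_current : Int) :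
    pvFlat (pvMergeSpans
        (PySem.List.sorted
          (([(1, min left_edge total_pages),
             (max 1 (current_page - left_current), min total_pages (current_page + left_current)),
             (max 1 (total_pages - right_edge + 1), total_pages)] : List (Int × Int)).filter
            (fun s => s.1 ≤ s.2))
          (fun s => s.1) false))
    = (PySem.List.pyRange 1 (total_pages + 1) 1).filter
        (fun num => decide (num ≤ left_edge ∨ total_pages - right_edge < num ∨ |num - current_page| ≤ left_current)) := by
  have h1 : ∀ s ∈ PySem.List.sorted
      (([(1, min left_edge total_pages),
         (max 1 (current_page - left_current), min total_pages (current_page + left_current)),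
         (max 1 (total_pages - right_edge + 1), total_pages)] : List (Int × Int)).filter
        (fun s => s.1 ≤ s.2)) (fun s => s.1) false, s.1 ≤ s.2 := by
    intro s hs
    rw [PySem.List.mem_sorted] at hs
    exact of_decide_eq_true (List.mem_filter.mp hs).2
  have h2 := PySem.List.sorted_pairwise
    (xs := ([(1, min left_edge total_pages),
       (max 1 (current_page - left_current), min total_pages (current_page + left_current)),
       (max 1 (total_pages - right_edge + 1), total_pages)] : List (Int × Int)).filter
      (fun s => s.1 ≤ s.2)) (key := fun s => s.1)
  obtain ⟨p1, p2, p3⟩ := pv_merge_props _ h1 h2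
  apply List.Perm.eq_of_pairwise' ((pv_flat_pairwise_lt _ p1 p2).imp le_of_lt)
    (((PySem.List.pairwise_lt_pyRange_one 1 (total_pages + 1)).filter _).imp le_of_lt)
  rw [List.perm_ext_iff_of_nodup ((pv_flat_pairwise_lt _ p1 p2).imp ne_of_lt)
      (((PySem.List.nodup_pyRange_one 1 (total_pages + 1)).filter _))]
  intro x
  rw [pv_mem_flat, List.mem_filter]
  constructor
  · rintro ⟨m, hm, hx1, hx2⟩
    have := (pv_mem_flat x _).mpr ⟨m, hm, hx1, hx2⟩
    rw [p3, pv_mem_flat] at this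
    obtain ⟨s, hs, hs1, hs2⟩ := this
    rw [PySem.List.mem_sorted, List.mem_filter] at hs
    have hsmem := hs.1
    simp only [List.mem_cons, List.not_mem_nil, or_false] at hsmem
    rw [PySem.List.mem_pyRange_one]
    constructor
    · rcases hsmem with h | h | h <;> (subst h; simp only at hs1 hs2) <;> omega
    · rw [decide_eq_true_eq, abs_le]
      rcases hsmem with h | h | h <;> (subst h; simp only at hs1 hs2)
      · left; omega
      · right; right; omega
      · right; left; omega
  · rintro ⟨hx, hsel⟩
    rw [PySem.List.mem_pyRange_one] at hx
    rw [decide_eq_true_eq, abs_le] at hsel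
    have : x ∈ pvFlat (PySem.List.sorted
        (([(1, min left_edge total_pages),
           (max 1 (current_page - left_current), min total_pages (current_page + left_current)),
           (max 1 (total_pages - right_edge + 1), total_pages)] : List (Int × Int)).filter
          (fun s => s.1 ≤ s.2)) (fun s => s.1) false) := by
      rw [pv_mem_flat]
      rcases hsel with h | h | h
      · exact ⟨(1, min left_edge total_pages), by
          rw [PySem.List.mem_sorted, List.mem_filter]; constructor; simp; simp; omega, by omega, by simp; omega⟩
      · exact ⟨(max 1 (total_pages - right_edge + 1), total_pages), by
          rw [PySem.List.mem_sorted, List.mem_filter]; constructor; simp; simp; omega, by simp; omega, by omega⟩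
      · exact ⟨(max 1 (current_page - left_current), min total_pages (current_page + left_current)), by
          rw [PySem.List.mem_sorted, List.mem_filter]; constructor; simp; simp; omega, by simp; omega, by simp; omega⟩
    rw [← p3, pv_mem_flat] at this
    exact this

-- the merged spans are proper intervals
theorem pv_merged_proper (current_page total_pages left_edge right_edge left_current : Int) :
    ∀ m ∈ pvMergeSpans
        (PySem.List.sorted
          (([(1, min left_edge total_pages),
             (max 1 (current_page - left_current), min total_pages (current_page + left_current)),
             (max 1 (total_pages - right_edge + 1), total_pages)] : List (Int × Int)).filter
            (fun s => s.1 ≤ s.2))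
          (fun s => s.1) false), m.1 ≤ m.2 := by
  refine (pv_merge_props (PySem.List.sorted
          (([(1, min left_edge total_pages),
             (max 1 (current_page - left_current), min total_pages (current_page + left_current)),
             (max 1 (total_pages - right_edge + 1), total_pages)] : List (Int × Int)).filter
            (fun s => s.1 ≤ s.2))
          (fun s => s.1) false) ?_ ?_).1
  · intro s hs; rw [PySem.List.mem_sorted] at hs; exact of_decide_eq_true (List.mem_filter.mp hs).2
  · exact PySem.List.sorted_pairwise _ _

-- ===== VERDICT (by name: the statement is the Claim_ definition above) =====
theorem get_pagination_iter_spec : Claim_equal_get_pagination_iter := by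
  intro current_page total_pages left_edge right_edge left_current right_current _
  unfold Spec_get_pagination_iter get_pagination_iter get_pagination_iter_alt
  split
  · rfl
  · split
    · rfl
    · rw [pv_fold_merged _ (pv_merged_proper current_page total_pages left_edge right_edge left_current)]
      rw [pv_flat_eq_filter current_page total_pages left_edge right_edge left_current]
      rw [← pv_foldl_guard _ (fun num => num ≤ left_edge ∨ total_pages - right_edge < num ∨ |num - current_page| ≤ left_current) pvStep]
      rfl
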